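-- pv_equiv track=rewrite | github.com/kinanhino/imperva-home-task | task_one/ipv6_or_dual.py | check_ip6_hextet
-- ===== SOURCE A (Python) =====
-- def check_ip6_hextet(hextet):
--     valid_characters = "0123456789abcdef"
--     if len(hextet) < 5:
--         for char in hextet:
--             if char not in valid_characters:
--                 return False
--         return True
--     return False
-- ===== SOURCE B (Python) =====
-- import re
--
-- def check_ip6_hextet(hextet):
--     return re.fullmatch(r'[0-9a-f]{0,4}', hextet) is not None
-- ===== Notes on version B (the rewrite author's own statement) =====
-- stated objective: idiomatic
-- what changed: Replaced the explicit length guard plus per-character membership loop with a single regular-expression fullmatch of [0-9a-f]{0,4}.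
import Mathlib
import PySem

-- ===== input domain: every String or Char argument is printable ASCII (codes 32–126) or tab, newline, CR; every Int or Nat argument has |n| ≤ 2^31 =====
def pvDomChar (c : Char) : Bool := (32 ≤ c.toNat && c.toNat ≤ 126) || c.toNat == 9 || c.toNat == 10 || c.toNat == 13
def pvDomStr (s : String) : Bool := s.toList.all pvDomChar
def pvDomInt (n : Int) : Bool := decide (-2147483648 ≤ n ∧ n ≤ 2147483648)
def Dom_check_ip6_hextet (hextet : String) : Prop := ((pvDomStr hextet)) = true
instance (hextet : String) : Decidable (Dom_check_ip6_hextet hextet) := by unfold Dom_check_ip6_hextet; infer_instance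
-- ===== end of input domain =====

-- B replaces A's explicit length guard + per-character loop with a single regex fullmatch of [0-9a-f]{0,4} (objective: idiomatic).
-- ===== PORT A =====
-- loop with early return over the characters, as in A
def pvLoopA : List Char → Bool
  | [] => true
  | c :: cs => if !(("0123456789abcdef".toList).contains c) then false else pvLoopA cs

def check_ip6_hextet (hextet : String) : Bool :=
  if hextet.toList.length < 5 then pvLoopA hextet.toList else false

-- ===== PORT B =====
-- regex fullmatch of [0-9a-f]{0,4}: at most 4 chars, each in the class [0-9a-f]
def pvHexClass (c : Char) : Bool := ('0' ≤ c && c ≤ '9') || ('a' ≤ c && c ≤ 'f')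

def check_ip6_hextet_alt (hextet : String) : Bool :=
  hextet.toList.length ≤ 4 && hextet.toList.all pvHexClass

-- ===== PRECONDITION & SPEC =====
def Spec_check_ip6_hextet (hextet : String) (out : Bool) : Prop := out = check_ip6_hextet_alt hextet
instance (hextet : String) (out : Bool) : Decidable (Spec_check_ip6_hextet hextet out) := by unfold Spec_check_ip6_hextet; infer_instance

-- ===== CLAIM (what is proved, stated in full; the proofs are below) =====
def Claim_equal_check_ip6_hextet : Prop := ∀ (hextet : String), Dom_check_ip6_hextet hextet → Spec_check_ip6_hextet hextet (check_ip6_hextet hextet)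

-- ===== LEMMAS AND PROOFS =====

-- ===== VERDICT (by name: the statement is the Claim_ definition above) =====
lemma pvHexClass_eq_contains (c : Char) :
    ("0123456789abcdef".toList).contains c = pvHexClass c := by
  simp only [List.contains_eq_mem, pvHexClass]
  simp [Char.le_def, UInt32.le_iff_toNat_le, Char.ext_iff, UInt32.toNat_inj.symm]
  rw [Bool.eq_iff_iff]
  simp only [Bool.or_eq_true, Bool.and_eq_true, decide_eq_true_eq]
  omega

lemma pvLoopA_eq_all (l : List Char) : pvLoopA l = l.all pvHexClass := by
  induction l with
  | nil => rfl
  | cons c cs ih =>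
    simp only [pvLoopA, List.all_cons, ih, pvHexClass_eq_contains c]
    cases pvHexClass c <;> simp

theorem check_ip6_hextet_spec : Claim_equal_check_ip6_hextet := by
  intro hextet _
  unfold Spec_check_ip6_hextet check_ip6_hextet check_ip6_hextet_alt
  have hl : hextet.toList.length = hextet.length := String.length_toList
  split
  · rw [pvLoopA_eq_all]
    have h4 : hextet.length ≤ 4 := by omega
    simp [h4]
  · have h4 : ¬ hextet.length ≤ 4 := by omega
    simp [h4]
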